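-- pv_equiv track=rewrite | github.com/andre-barbe/Coal-Restrictions | ReadCSV.py | break_into_arrays
-- ===== SOURCE A (Python) =====
-- from typing import List
--
-- def break_into_arrays(csvlines: List[str]) -> List[str]:
--     """
--     Groups the list of lines by array
--     :param csvlines:
--     :return:
--     """
--     listofarrays = []
--     currentarray = []
--     for i, line in enumerate(csvlines):
--         if line[0:11] == " ! Variable" and line[-2:] == "#\n":
--             listofarrays.append(currentarray)
--             currentarray = []
--         if (line[0:11] != " ! Variable" and line[0:25] != " ! (This array is shown as"):
--             currentarray.append(line)
--         if i == len(csvlines) - 1: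
--             listofarrays.append(currentarray)
--     return listofarrays
-- ===== SOURCE B (Python) =====
-- from typing import List
--
--
-- def _kept(lines):
--     return [l for l in lines
--             if l[0:11] != " ! Variable" and l[0:25] != " ! (This array is shown as"]
--
--
-- def _segments(lines):
--     for b, line in enumerate(lines):
--         if line[0:11] == " ! Variable" and line[-2:] == "#\n":
--             return [_kept(lines[:b])] + _segments(lines[b + 1:])
--     return [_kept(lines)]
--
--
-- def break_into_arrays(csvlines: List[str]) -> List[str]:
--     """Split recursively at the first boundary line; filter each segment."""
--     if not csvlines:
--         return []
--     return _segments(csvlines)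
-- ===== Notes on version B (the rewrite author's own statement) =====
-- stated objective: alternative
-- what changed: Replaces A's single-pass enumerate loop with a mutable flush/append accumulator by a recursive decomposition: find the first boundary line, emit the filtered segment before it, and recurse on the tail, with the per-segment filter as a separate list comprehension.
import Mathlib
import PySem

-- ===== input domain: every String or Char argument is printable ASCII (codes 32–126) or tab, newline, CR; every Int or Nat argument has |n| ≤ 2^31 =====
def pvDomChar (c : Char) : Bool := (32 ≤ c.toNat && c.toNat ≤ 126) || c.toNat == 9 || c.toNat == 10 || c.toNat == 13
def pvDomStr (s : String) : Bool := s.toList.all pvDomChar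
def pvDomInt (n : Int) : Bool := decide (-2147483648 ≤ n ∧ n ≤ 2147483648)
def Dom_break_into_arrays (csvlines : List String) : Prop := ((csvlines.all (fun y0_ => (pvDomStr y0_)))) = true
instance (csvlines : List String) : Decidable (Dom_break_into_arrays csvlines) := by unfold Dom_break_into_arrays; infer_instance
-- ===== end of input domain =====

-- B replaces A's single-pass flush/append accumulator by a recursive split at the
-- first boundary line plus a per-segment filter (different decomposition, same cost).

-- ===== PORT A =====
-- line[0:11] == " ! Variable" and line[-2:] == "#\n"
def pvIsBoundary (line : String) : Bool :=
  (PySem.Str.slice line (some 0) (some 11) == " ! Variable") &&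
  (PySem.Str.slice line (some (-2)) none == "#\n")

-- line[0:11] != " ! Variable" and line[0:25] != " ! (This array is shown as"
def pvKeepLine (line : String) : Bool :=
  (PySem.Str.slice line (some 0) (some 11) != " ! Variable") &&
  (PySem.Str.slice line (some 0) (some 25) != " ! (This array is shown as")

def break_into_arrays (csvlines : List String) : List (List String) :=
  ((PySem.List.enumerate csvlines 0).foldl
    (fun (st : List (List String) × List String) (p : Int × String) =>
      let st := if pvIsBoundary p.2 then (st.1 ++ [st.2], ([] : List String)) else st
      let st := if pvKeepLine p.2 then (st.1, st.2 ++ [p.2]) else st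
      if p.1 == (csvlines.length : Int) - 1 then (st.1 ++ [st.2], st.2) else st)
    ([], [])).1

-- ===== PORT B =====
-- _kept: the per-segment list comprehension
def pvKept (lines : List String) : List String := lines.filter pvKeepLine

-- _segments: split at the first boundary line (the enumerate loop with early return)
def pvSegments (lines : List String) : List (List String) :=
  match h : lines.findIdx? pvIsBoundary with
  | none => [pvKept lines]
  | some b => pvKept (lines.take b) :: pvSegments (lines.drop (b + 1))
termination_by lines.length
decreasing_by
  have hb := (List.findIdx?_eq_some_iff_findIdx_eq.mp h).1
  simp only [List.length_drop]; omega

def break_into_arrays_alt (csvlines : List String) : List (List String) :=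
  if csvlines.isEmpty then [] else pvSegments csvlines

-- ===== PRECONDITION & SPEC =====
def Spec_break_into_arrays (csvlines : List String) (out : List (List String)) : Prop := out = break_into_arrays_alt csvlines
instance (csvlines : List String) (out : List (List String)) : Decidable (Spec_break_into_arrays csvlines out) := by unfold Spec_break_into_arrays; infer_instance

-- ===== CLAIM (what is proved, stated in full; the proofs are below) =====
def Claim_equal_break_into_arrays : Prop := ∀ (csvlines : List String), Dom_break_into_arrays csvlines → Spec_break_into_arrays csvlines (break_into_arrays csvlines)

-- ===== LEMMAS AND PROOFS =====

-- the (possibly empty) contribution of one line to the current group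
def pvKeptOne (l : String) : List String := if pvKeepLine l then [l] else []

-- A's loop, written as structural recursion on the remaining lines (flush at the end)
def pvFA (cur : List String) : List String → List (List String)
  | [] => [cur]
  | l :: rest =>
    if pvIsBoundary l then cur :: pvFA (pvKeptOne l) rest
    else pvFA (cur ++ pvKeptOne l) rest

theorem pvKeep_of_boundary {l : String} (h : pvIsBoundary l = true) :
    pvKeepLine l = false := by
  simp only [pvIsBoundary, Bool.and_eq_true, beq_iff_eq] at h
  simp [pvKeepLine, h.1]

theorem pvModifyHead_nil_append (l : List (List String)) :
    l.modifyHead (fun g => ([] : List String) ++ g) = l := by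
  cases l <;> simp

-- A's foldl over enumerate equals pvFA, for a nonempty suffix ending at index n-1
theorem pvFoldA (n : Int) (xs : List String) :
    ∀ (k : Int) (loa : List (List String)) (cur : List String), xs ≠ [] →
      k + (xs.length : Int) = n →
      ((PySem.List.enumerate xs k).foldl
        (fun (st : List (List String) × List String) (p : Int × String) =>
          let st := if pvIsBoundary p.2 then (st.1 ++ [st.2], ([] : List String)) else st
          let st := if pvKeepLine p.2 then (st.1, st.2 ++ [p.2]) else st
          if p.1 == n - 1 then (st.1 ++ [st.2], st.2) else st)
        (loa, cur)).1 = loa ++ pvFA cur xs := by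
  induction xs with
  | nil => intro _ _ _ hne _; exact absurd rfl hne
  | cons x rest ih =>
    intro k loa cur _ hk
    rw [PySem.List.enumerate_cons, List.foldl_cons]
    cases rest with
    | nil =>
      have hkn : (k == n - 1) = true := by
        simp only [List.length_cons, List.length_nil] at hk
        simp only [beq_iff_eq]; omega
      rw [PySem.List.enumerate_nil, List.foldl_nil]
      cases hb : pvIsBoundary x <;> cases hkeep : pvKeepLine x <;>
        simp [hb, hkeep, hkn, pvFA, pvKeptOne]
    | cons y rest' =>
      have hkn : (k == n - 1) = false := by
        simp only [List.length_cons] at hk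
        simp only [beq_eq_false_iff_ne, ne_eq]
        push_cast at hk; omega
      have hk' : (k + 1) + ((y :: rest').length : Int) = n := by
        simp only [List.length_cons] at hk ⊢; push_cast at hk ⊢; omega
      cases hb : pvIsBoundary x <;> cases hkeep : pvKeepLine x <;>
      · simp only [if_true, if_false, Bool.false_eq_true, hkn]
        first
        | (rw [ih (k + 1) (loa ++ [cur]) _ (by simp) hk']
           simp [pvFA, hb, pvKeptOne, hkeep])
        | (rw [ih (k + 1) loa _ (by simp) hk']
           simp [pvFA, hb, pvKeptOne, hkeep])

theorem pvA_char (csvlines : List String) :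
    break_into_arrays csvlines =
      if csvlines.isEmpty then [] else pvFA [] csvlines := by
  cases csvlines with
  | nil => simp [break_into_arrays, PySem.List.enumerate_nil]
  | cons x rest =>
    unfold break_into_arrays
    rw [pvFoldA ((x :: rest).length : Int) (x :: rest) 0 [] [] (by simp) (by omega)]
    simp

theorem pvSegments_eq_none {xs : List String} (hf : xs.findIdx? pvIsBoundary = none) :
    pvSegments xs = [pvKept xs] := by
  conv_lhs => unfold pvSegments
  split
  · rfl
  · rename_i b heq; rw [hf] at heq; exact absurd heq (by simp)

theorem pvSegments_eq_some {xs : List String} {b : Nat}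
    (hf : xs.findIdx? pvIsBoundary = some b) :
    pvSegments xs = pvKept (xs.take b) :: pvSegments (xs.drop (b + 1)) := by
  conv_lhs => unfold pvSegments
  split
  · rename_i heq; rw [hf] at heq; exact absurd heq (by simp)
  · rename_i b' heq; rw [hf] at heq
    obtain rfl : b' = b := by injection heq with h; omega
    rfl

theorem pvSegments_nil : pvSegments [] = [[]] := by
  rw [pvSegments_eq_none (by simp)]; rfl

theorem pvSegments_cons_boundary {l : String} (rest : List String)
    (h : pvIsBoundary l = true) :
    pvSegments (l :: rest) = [] :: pvSegments rest := by
  rw [pvSegments_eq_some (xs := l :: rest) (b := 0) (by simp [List.findIdx?_cons, h])]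
  simp [pvKept]

theorem pvSegments_cons_not {l : String} (rest : List String)
    (h : pvIsBoundary l = false) :
    pvSegments (l :: rest) = (pvSegments rest).modifyHead (fun g => pvKeptOne l ++ g) := by
  cases hf : rest.findIdx? pvIsBoundary with
  | none =>
    rw [pvSegments_eq_none (by simp [List.findIdx?_cons, h, hf]),
      pvSegments_eq_none hf, List.modifyHead_cons]
    simp only [pvKept, List.filter_cons, pvKeptOne]
    cases hkeep : pvKeepLine l <;> simp
  | some b =>
    rw [pvSegments_eq_some (xs := l :: rest) (b := b + 1)
        (by simp [List.findIdx?_cons, h, hf]),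
      pvSegments_eq_some hf, List.modifyHead_cons, List.drop_succ_cons,
      List.take_succ_cons]
    simp only [pvKept, List.filter_cons, pvKeptOne]
    cases hkeep : pvKeepLine l <;> simp

theorem pvModifyHead_comp (f g : List String → List String) (l : List (List String)) :
    (l.modifyHead g).modifyHead f = l.modifyHead (fun x => f (g x)) := by
  cases l <;> simp

theorem pvFA_eq_segments (xs : List String) :
    ∀ cur, pvFA cur xs = (pvSegments xs).modifyHead (fun g => cur ++ g) := by
  induction xs with
  | nil => intro cur; simp [pvFA, pvSegments_nil]
  | cons l rest ih =>
    intro cur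
    cases hb : pvIsBoundary l
    · rw [pvSegments_cons_not rest hb, pvModifyHead_comp]
      simp only [pvFA, hb, Bool.false_eq_true, if_false]
      rw [ih (cur ++ pvKeptOne l)]
      simp [List.append_assoc]
    · rw [pvSegments_cons_boundary rest hb, List.modifyHead_cons]
      simp only [pvFA, hb, if_true]
      have h0 : pvKeptOne l = [] := by simp [pvKeptOne, pvKeep_of_boundary hb]
      rw [h0, ih [], pvModifyHead_nil_append]
      simp

-- ===== VERDICT (by name: the statement is the Claim_ definition above) =====
theorem break_into_arrays_spec : Claim_equal_break_into_arrays := by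
  intro csvlines _
  unfold Spec_break_into_arrays break_into_arrays_alt
  rw [pvA_char]
  cases h : csvlines.isEmpty
  · simp only [Bool.false_eq_true, if_false]
    rw [pvFA_eq_segments csvlines [], pvModifyHead_nil_append]
  · simp
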